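-- pv_equiv track=rewrite | github.com/JKHira/sdsl2_coder | references/sdsl2_lint_samples/lint_utils.py | count_bracket_delta
-- ===== SOURCE A (Python) =====
-- from typing import Iterable, Optional
--
-- def count_bracket_delta(line: str) -> int:
--     delta = 0
--     index = 0
--     in_string: Optional[str] = None
--     escape = False
--     in_block = False
--     while index < len(line):
--         ch = line[index]
--         next_two = line[index : index + 2]
--         if in_block:
--             if next_two == "*/":
--                 in_block = False
--                 index += 2
--                 continue
--             index += 1
--             continue
--         if in_string:
--             if escape:
--                 escape = False
--             elif ch == "\\":
--                 escape = True
--             elif ch == in_string: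
--                 in_string = None
--             index += 1
--             continue
--         if next_two == "//":
--             break
--         if next_two == "/*":
--             in_block = True
--             index += 2
--             continue
--         if ch in ("\"", "'"):
--             in_string = ch
--             index += 1
--             continue
--         if ch == "[":
--             delta += 1
--         elif ch == "]":
--             delta -= 1
--         index += 1
--     return delta
-- ===== SOURCE B (Python) =====
-- def count_bracket_delta(line: str) -> int:
--     # Strip string literals and comments first, then count brackets in the rest.
--     n = len(line)
--     cleaned = []
--     i = 0
--     while i < n:
--         c = line[i]
--         if line.startswith("//", i):
--             break
--         if line.startswith("/*", i):
--             i += 2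
--             while i < n and not line.startswith("*/", i):
--                 i += 1
--             if i < n:
--                 i += 2
--         elif c == '"' or c == "'":
--             i += 1
--             while i < n and line[i] != c:
--                 i += 2 if line[i] == "\\" else 1
--             i += 1
--         else:
--             cleaned.append(c)
--             i += 1
--     return cleaned.count("[") - cleaned.count("]")
-- ===== Notes on version B (the rewrite author's own statement) =====
-- stated objective: alternative
-- what changed: B first strips string literals and comments from the line (honouring backslash escapes, unterminated strings and unterminated block comments) into a cleaned character list and then counts opening minus closing square brackets in it, instead of A's single five-state scanner that updates a running delta while tracking in_string/escape/in_block flags.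
import Mathlib
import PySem

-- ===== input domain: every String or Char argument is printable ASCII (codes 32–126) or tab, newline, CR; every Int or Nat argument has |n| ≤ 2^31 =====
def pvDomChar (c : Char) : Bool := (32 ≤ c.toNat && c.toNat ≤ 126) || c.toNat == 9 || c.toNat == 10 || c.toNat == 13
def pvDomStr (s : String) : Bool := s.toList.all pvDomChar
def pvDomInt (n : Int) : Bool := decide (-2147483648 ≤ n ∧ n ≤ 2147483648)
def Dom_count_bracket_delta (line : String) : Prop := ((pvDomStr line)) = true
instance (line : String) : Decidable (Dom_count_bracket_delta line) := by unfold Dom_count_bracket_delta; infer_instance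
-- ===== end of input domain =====

-- B strips string literals and comments out of the line first and counts brackets in the
-- cleaned remainder, instead of A's single five-state scanner updating a running delta.
-- Ports walk the remaining suffix of the character list where the Pythons advance an index.

-- ===== PORT A =====
-- the while loop of A with its state (delta, in_string, escape, in_block); the index
-- becomes the remaining suffix, line[index:index+2] the first two characters of it.
-- On the last character (next_two is one character long) only the bracket branches can
-- change the result, so that case returns the final delta directly.
def cbdLoopA : List Char → Int → Option Char → Bool → Bool → Int
  | [], delta, _, _, _ => delta
  | [c], delta, in_string, _, in_block =>
    if in_block then delta
    else
      match in_string with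
      | some _ => delta
      | none =>
        if c = '"' ∨ c = '\'' then delta
        else if c = '[' then delta + 1
        else if c = ']' then delta - 1
        else delta
  | c :: d :: rest2, delta, in_string, escape, in_block =>
    if in_block then
      if c = '*' ∧ d = '/' then cbdLoopA rest2 delta in_string escape false
      else cbdLoopA (d :: rest2) delta in_string escape in_block
    else
      match in_string with
      | some q =>
        if escape then cbdLoopA (d :: rest2) delta in_string false in_block
        else if c = '\\' then cbdLoopA (d :: rest2) delta in_string true in_block
        else if c = q then cbdLoopA (d :: rest2) delta none escape in_block
        else cbdLoopA (d :: rest2) delta in_string escape in_block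
      | none =>
        if c = '/' ∧ d = '/' then delta
        else if c = '/' ∧ d = '*' then cbdLoopA rest2 delta in_string escape true
        else if c = '"' ∨ c = '\'' then cbdLoopA (d :: rest2) delta (some c) escape in_block
        else if c = '[' then cbdLoopA (d :: rest2) (delta + 1) in_string escape in_block
        else if c = ']' then cbdLoopA (d :: rest2) (delta - 1) in_string escape in_block
        else cbdLoopA (d :: rest2) delta in_string escape in_block

def count_bracket_delta (line : String) : Int :=
  cbdLoopA line.toList 0 none false false

-- ===== PORT B =====
-- inner while of B skipping a string literal opened with quote q: returns the suffix
-- after the closing quote (a backslash consumes the following character; a string that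
-- does not close runs to the end of the line)
def cbdSkipStr (q : Char) : List Char → List Char
  | [] => []
  | [c] => if c = q then [] else []   -- last character: closing quote or not, nothing remains
  | c :: d :: rest2 =>
    if c = q then d :: rest2
    else if c = '\\' then cbdSkipStr q rest2
    else cbdSkipStr q (d :: rest2)

-- inner while of B skipping a block comment: returns the suffix after the closing "*/"
-- (an unterminated comment runs to the end of the line)
def cbdSkipBlock : List Char → List Char
  | [] => []
  | [_] => []
  | c :: d :: rest2 => if c = '*' ∧ d = '/' then rest2 else cbdSkipBlock (d :: rest2)

-- the skip helpers never lengthen the suffix; the outer loop of B needs this to terminate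
lemma cbdSkipStr_len (q : Char) :
    ∀ (n : Nat) (cs : List Char), cs.length ≤ n → (cbdSkipStr q cs).length ≤ cs.length := by
  intro n
  induction n with
  | zero =>
    intro cs h
    cases cs with
    | nil => simp [cbdSkipStr]
    | cons c rest => simp at h
  | succ n ih =>
    intro cs h
    match cs with
    | [] => simp [cbdSkipStr]
    | [c] => rw [cbdSkipStr]; split_ifs <;> simp
    | c :: d :: rest2 =>
      rw [cbdSkipStr]
      split_ifs with h1 h2
      · simp
      · have := ih rest2 (by simp at h ⊢; omega)
        simp at h ⊢
        omega
      · have := ih (d :: rest2) (by simp at h ⊢; omega)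
        simp at h this ⊢
        omega

lemma cbdSkipBlock_len :
    ∀ (n : Nat) (cs : List Char), cs.length ≤ n → (cbdSkipBlock cs).length ≤ cs.length := by
  intro n
  induction n with
  | zero =>
    intro cs h
    cases cs with
    | nil => simp [cbdSkipBlock]
    | cons c rest => simp at h
  | succ n ih =>
    intro cs h
    match cs with
    | [] => simp [cbdSkipBlock]
    | [c] => simp [cbdSkipBlock]
    | c :: d :: rest2 =>
      rw [cbdSkipBlock]
      split_ifs with h1
      · simp only [List.length_cons]
        omega
      · have := ih (d :: rest2) (by simp at h ⊢; omega)
        simp at h this ⊢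
        omega

-- outer while of B: the cleaned characters (everything outside strings and comments)
def cbdStrip : List Char → List Char
  | [] => []
  | [c] =>   -- last character: it cannot open a comment, and an opened string eats it
    if c = '"' ∨ c = '\'' then [] else [c]
  | c :: d :: rest2 =>
    if c = '/' ∧ d = '/' then []
    else if c = '/' ∧ d = '*' then cbdStrip (cbdSkipBlock rest2)
    else if c = '"' ∨ c = '\'' then cbdStrip (cbdSkipStr c (d :: rest2))
    else c :: cbdStrip (d :: rest2)
termination_by cs => cs.length
decreasing_by
  · exact Nat.lt_of_le_of_lt (cbdSkipBlock_len rest2.length rest2 le_rfl) (by simp)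
  · exact Nat.lt_of_le_of_lt (cbdSkipStr_len c (d :: rest2).length (d :: rest2) le_rfl) (by simp)
  · simp

def count_bracket_delta_alt (line : String) : Int :=
  let cleaned := cbdStrip line.toList
  (cleaned.count '[' : Int) - (cleaned.count ']' : Int)

-- ===== PRECONDITION & SPEC =====
def Spec_count_bracket_delta (line : String) (out : Int) : Prop := out = count_bracket_delta_alt line
instance (line : String) (out : Int) : Decidable (Spec_count_bracket_delta line out) := by unfold Spec_count_bracket_delta; infer_instance

-- ===== CLAIM (what is proved, stated in full; the proofs are below) =====
def Claim_equal_count_bracket_delta : Prop := ∀ (line : String), Dom_count_bracket_delta line → Spec_count_bracket_delta line (count_bracket_delta line)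

-- ===== LEMMAS AND PROOFS =====

-- A inside a block comment scans exactly to where B's block skip resumes
lemma loop_block :
    ∀ (cs : List Char) (delta : Int),
      cbdLoopA cs delta none false true = cbdLoopA (cbdSkipBlock cs) delta none false false := by
  intro cs
  induction cs with
  | nil => intro delta; rfl
  | cons c rest ih =>
    intro delta
    cases rest with
    | nil => rfl
    | cons d rest2 =>
      rw [cbdLoopA, cbdSkipBlock]
      by_cases h : c = '*' ∧ d = '/'
      · simp [h]
      · simp only [h, if_false, if_true]
        exact ih delta

-- A inside a string literal scans exactly to where B's string skip resumes
lemma loop_str (q : Char) (hq : q ≠ '\\') :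
    ∀ (n : Nat) (cs : List Char) (delta : Int), cs.length ≤ n →
      cbdLoopA cs delta (some q) false false =
        cbdLoopA (cbdSkipStr q cs) delta none false false := by
  intro n
  induction n with
  | zero =>
    intro cs delta h
    cases cs with
    | nil => rfl
    | cons c rest => simp at h
  | succ n ih =>
    intro cs delta h
    match cs with
    | [] => rfl
    | [c] => rw [cbdLoopA, cbdSkipStr]; split_ifs <;> rfl
    | c :: d :: rest2 =>
      rw [cbdLoopA, cbdSkipStr]
      have hq' : ¬ ('\\' : Char) = q := fun h' => hq h'.symm
      by_cases hbs : c = '\\'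
      · subst hbs
        simp [hq']
        match rest2 with
        | [] => simp [cbdLoopA, cbdSkipStr]
        | e :: rest3 =>
          rw [cbdLoopA]
          simp
          exact ih (e :: rest3) delta (by simp at h ⊢; omega)
      · by_cases hcq : c = q
        · simp [hbs, hcq, hq]
        · simp [hbs, hcq]
          exact ih (d :: rest2) delta (by simp at h ⊢; omega)

-- main invariant: A's running delta equals the bracket count of B's cleaned suffix
lemma loop_strip :
    ∀ (n : Nat) (cs : List Char) (delta : Int), cs.length ≤ n →
      cbdLoopA cs delta none false false =
        delta + ((cbdStrip cs).count '[' : Int) - ((cbdStrip cs).count ']' : Int) := by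
  intro n
  induction n with
  | zero =>
    intro cs delta h
    cases cs with
    | nil => simp [cbdLoopA, cbdStrip]
    | cons c rest => simp at h
  | succ n ih =>
    intro cs delta h
    match cs with
    | [] => simp [cbdLoopA, cbdStrip]
    | [c] =>
      rw [cbdLoopA, cbdStrip]
      by_cases h3 : c = '"' ∨ c = '\''
      · simp [h3]
      · simp only [h3, if_false]
        by_cases h4 : c = '['
        · simp [h4]
        · by_cases h5 : c = ']'
          · simp [h4, h5]
          · simp [h4, h5, List.count_singleton]
    | c :: d :: rest2 =>
      rw [cbdLoopA, cbdStrip]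
      by_cases h1 : c = '/' ∧ d = '/'
      · simp [h1]
      · simp only [h1, if_false]
        by_cases h2 : c = '/' ∧ d = '*'
        · simp only [h2, if_true]
          rw [loop_block rest2 delta]
          exact ih (cbdSkipBlock rest2) delta
            (by have := cbdSkipBlock_len rest2.length rest2 le_rfl; simp at h ⊢; omega)
        · simp only [h2, if_false]
          by_cases h3 : c = '"' ∨ c = '\''
          · have hq : c ≠ '\\' := by rcases h3 with h' | h' <;> rw [h'] <;> decide
            simp only [h3, if_true]
            rw [loop_str c hq (rest2.length + 1) (d :: rest2) delta (by simp)]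
            exact ih (cbdSkipStr c (d :: rest2)) delta
              (by have := cbdSkipStr_len c (d :: rest2).length (d :: rest2) le_rfl
                  simp at h this ⊢; omega)
          · simp only [h3, if_false]
            have hrec : ∀ dl : Int, cbdLoopA (d :: rest2) dl none false false =
                dl + ((cbdStrip (d :: rest2)).count '[' : Int) -
                  ((cbdStrip (d :: rest2)).count ']' : Int) :=
              fun dl => ih (d :: rest2) dl (by simp at h ⊢; omega)
            by_cases h4 : c = '['
            · simp only [h4, if_true]
              rw [hrec (delta + 1)]
              simp [h4, List.count_cons]
              push_cast
              ring
            · by_cases h5 : c = ']'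
              · simp only [h4, h5, if_true, if_false]
                rw [hrec (delta - 1)]
                simp [h4, h5, List.count_cons]
                push_cast
                ring
              · simp only [h4, h5, if_false]
                rw [hrec delta]
                simp [List.count_cons, h4, h5]

-- ===== VERDICT (by name: the statement is the Claim_ definition above) =====
theorem count_bracket_delta_spec : Claim_equal_count_bracket_delta := by
  intro line _
  unfold Spec_count_bracket_delta count_bracket_delta count_bracket_delta_alt
  rw [loop_strip line.toList.length line.toList 0 le_rfl]
  simp
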